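-- pv_equiv track=rewrite | github.com/Liu-WeiYi/Multilayer_Network_Embedding | link_pred.py | create_vertex
-- ===== SOURCE A (Python) =====
-- def create_vertex(nodepair_set):
--     vertex_set = {}
--     num = 0
--     for i in nodepair_set:
--         if i[0] not in vertex_set:
--             vertex_set[i[0]] = num
--             num += 1
--         if i[1] not in vertex_set:
--             vertex_set[i[1]] = num
--             num += 1
--     return vertex_set
-- ===== SOURCE B (Python) =====
-- def create_vertex(nodepair_set):
--     # Index of a vertex = number of distinct vertices occurring strictly before
--     # its first occurrence in the flattened pair stream; computed per position,
--     # no running counter and no incrementally built membership structure.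
--     flat = [v for pair in nodepair_set for v in (pair[0], pair[1])]
--     result = {}
--     for j, v in enumerate(flat):
--         if v not in flat[:j]:
--             result[v] = len(set(flat[:j]))
--     return result
-- ===== Notes on version B (the rewrite author's own statement) =====
-- stated objective: alternative
-- what changed: A makes one stateful pass keeping a dict and a running counter; B computes each vertex's index independently by a prefix formula over the flattened stream: index of v = number of distinct vertices strictly before v's first occurrence (len(set(flat[:j]))), with no running counter or incrementally built membership structure.
import Mathlib
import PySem

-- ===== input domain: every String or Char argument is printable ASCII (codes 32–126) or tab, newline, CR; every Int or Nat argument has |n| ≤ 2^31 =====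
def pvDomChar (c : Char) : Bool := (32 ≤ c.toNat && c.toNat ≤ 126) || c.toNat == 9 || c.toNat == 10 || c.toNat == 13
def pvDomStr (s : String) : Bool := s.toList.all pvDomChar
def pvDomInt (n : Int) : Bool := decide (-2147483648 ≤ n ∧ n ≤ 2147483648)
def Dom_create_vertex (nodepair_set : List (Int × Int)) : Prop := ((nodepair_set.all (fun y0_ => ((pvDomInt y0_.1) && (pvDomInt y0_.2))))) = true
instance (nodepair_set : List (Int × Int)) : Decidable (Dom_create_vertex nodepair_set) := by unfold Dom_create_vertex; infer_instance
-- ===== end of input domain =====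

-- B replaces A's stateful dict+counter pass by a per-position prefix formula
-- (index of v = number of distinct vertices before v's first occurrence); same result, quadratic.

-- ===== PORT A =====
-- the repeated "if v not in vertex_set: vertex_set[v] = num; num += 1" block of A
def pvStep (st : PySem.Dict Int Int × Int) (v : Int) : PySem.Dict Int Int × Int :=
  if st.1.contains v then st else (st.1.insert v st.2, st.2 + 1)

def create_vertex (nodepair_set : List (Int × Int)) : List (Int × Int) :=
  (nodepair_set.foldl (fun st i => pvStep (pvStep st i.1) i.2)
    (PySem.Dict.empty, 0)).1.items

-- ===== PORT B =====
def create_vertex_alt (nodepair_set : List (Int × Int)) : List (Int × Int) :=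
  let flat := nodepair_set.flatMap (fun pair => [pair.1, pair.2])
  ((PySem.List.enumerate flat 0).foldl
    (fun res jv =>
      if (PySem.List.slice flat none (some jv.1)).contains jv.2 then res
      else res.insert jv.2
        ((PySem.Set.ofList (PySem.List.slice flat none (some jv.1))).length : Int))
    PySem.Dict.empty).items

-- ===== PRECONDITION & SPEC =====
def Spec_create_vertex (nodepair_set : List (Int × Int)) (out : List (Int × Int)) : Prop := out = create_vertex_alt nodepair_set
instance (nodepair_set : List (Int × Int)) (out : List (Int × Int)) : Decidable (Spec_create_vertex nodepair_set out) := by unfold Spec_create_vertex; infer_instance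

-- ===== CLAIM (what is proved, stated in full; the proofs are below) =====
def Claim_equal_create_vertex : Prop := ∀ (nodepair_set : List (Int × Int)), Dom_create_vertex nodepair_set → Spec_create_vertex nodepair_set (create_vertex nodepair_set)

-- ===== LEMMAS AND PROOFS =====

-- the fresh (not-yet-seen) values of l relative to the seen list s, in first-occurrence order
def pvFresh (l : List Int) (s : List Int) : List Int :=
  match l with
  | [] => []
  | v :: t => if v ∈ s then pvFresh t s else v :: pvFresh t (s ++ [v])

-- same, but the "seen" list is the literal prefix (grows on every step)
def pvFreshP (l : List Int) (pre : List Int) : List Int :=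
  match l with
  | [] => []
  | v :: t => if v ∈ pre then pvFreshP t (pre ++ [v]) else v :: pvFreshP t (pre ++ [v])

-- pair each value with its sequential index starting at n
def pvIdx (l : List Int) (n : Int) : List (Int × Int) :=
  match l with
  | [] => []
  | v :: t => (v, n) :: pvIdx t (n + 1)

theorem pvFreshP_eq (l : List Int) (pre s : List Int) (h : ∀ x, x ∈ pre ↔ x ∈ s) :
    pvFreshP l pre = pvFresh l s := by
  induction l generalizing pre s with
  | nil => simp [pvFreshP, pvFresh]
  | cons v t ih =>
    simp only [pvFreshP, pvFresh, h v]
    by_cases hv : v ∈ s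
    · simp only [hv, if_true]
      exact ih _ _ (fun x => by
        simp only [List.mem_append, List.mem_singleton, h x]
        exact ⟨fun hx => hx.elim id (fun e => e ▸ hv), Or.inl⟩)
    · simp only [hv, if_false]
      exact congrArg _ (ih _ _ (fun x => by simp [h x]))

theorem pvFoldFlat (l : List (Int × Int)) (st : PySem.Dict Int Int × Int) :
    l.foldl (fun st i => pvStep (pvStep st i.1) i.2) st
      = (l.flatMap (fun pair => [pair.1, pair.2])).foldl pvStep st := by
  induction l generalizing st with
  | nil => simp
  | cons p t ih => simp [ih]

theorem pvInv (l : List Int) (d : PySem.Dict Int Int) :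
    (l.foldl pvStep (d, (d.size : Int))).1.items
      = d.items ++ pvIdx (pvFresh l d.keys) (d.size : Int) := by
  induction l generalizing d with
  | nil => simp [pvFresh, pvIdx]
  | cons v t ih =>
    simp only [List.foldl_cons, pvStep, pvFresh]
    rw [PySem.Dict.contains_eq_decide_mem_keys]
    by_cases h : v ∈ d.keys
    · simpa [h] using ih d
    · have hc : d.contains v = false := by
        rw [PySem.Dict.contains_eq_decide_mem_keys]; simp [h]
      have hsize : ((d.insert v (d.size : Int)).size : Int) = (d.size : Int) + 1 := by
        rw [PySem.Dict.size_insert, hc]; push_cast; simp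
      have := ih (d.insert v (d.size : Int))
      rw [hsize] at this
      simp only [h, decide_false, if_false, Bool.false_eq_true]
      rw [this, PySem.Dict.items_insert_of_not_contains d _ hc,
        PySem.Dict.keys_insert_of_not_contains d _ hc]
      simp [pvIdx]

theorem pvOfListAppend (pre : List Int) (v : Int) :
    PySem.Set.ofList (pre ++ [v])
      = if v ∈ PySem.Set.ofList pre then PySem.Set.ofList pre
        else PySem.Set.ofList pre ++ [v] := by
  rw [PySem.Set.ofList_eq_foldl, PySem.Set.ofList_eq_foldl, List.foldl_append]
  simp [PySem.Set.add]

theorem pvBInv (flat : List Int) (t pre : List Int) (d : PySem.Dict Int Int)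
    (hf : flat = pre ++ t) (hk : d.keys = PySem.Set.ofList pre) :
    ((PySem.List.enumerate t (pre.length : Int)).foldl
      (fun res jv =>
        if (PySem.List.slice flat none (some jv.1)).contains jv.2 then res
        else res.insert jv.2
          ((PySem.Set.ofList (PySem.List.slice flat none (some jv.1))).length : Int))
      d).items
      = d.items ++ pvIdx (pvFreshP t pre) ((PySem.Set.ofList pre).length : Int) := by
  induction t generalizing pre d with
  | nil => simp [PySem.List.enumerate, pvFreshP, pvIdx]
  | cons v t ih =>
    rw [PySem.List.enumerate_cons, List.foldl_cons]
    have hslice : PySem.List.slice flat none (some (pre.length : Int)) = pre := by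
      rw [PySem.List.slice_to_natCast, hf, List.take_left]
    have hmemiff : ∀ x : Int, x ∈ pre ↔ x ∈ PySem.Set.ofList pre := by
      intro x; simp [PySem.Set.mem_ofList]
    simp only [hslice]
    by_cases h : v ∈ pre
    · have hcont : pre.contains v = true := by simp [h]
      simp only [hcont, if_true]
      have hf' : flat = (pre ++ [v]) ++ t := by rw [hf]; simp
      have hk' : d.keys = PySem.Set.ofList (pre ++ [v]) := by
        rw [pvOfListAppend]; simp [← hmemiff v, h, hk]
      have := ih (pre ++ [v]) d hf' hk'
      have hlen : ((pre ++ [v]).length : Int) = (pre.length : Int) + 1 := by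
        simp
      rw [hlen] at this
      rw [this]
      have hsame : PySem.Set.ofList (pre ++ [v]) = PySem.Set.ofList pre := by
        rw [pvOfListAppend]; simp [← hmemiff v, h]
      rw [hsame]
      simp [pvFreshP, h]
    · have hcont : pre.contains v = false := by simp [h]
      have hdc : d.contains v = false := by
        rw [PySem.Dict.contains_eq_decide_mem_keys, hk]
        simp [← hmemiff v, h]
      simp only [hcont, if_false, Bool.false_eq_true]
      have hf' : flat = (pre ++ [v]) ++ t := by rw [hf]; simp
      set n : Int := ((PySem.Set.ofList pre).length : Int) with hn
      have hk' : (d.insert v n).keys = PySem.Set.ofList (pre ++ [v]) := by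
        rw [PySem.Dict.keys_insert_of_not_contains d _ hdc, hk, pvOfListAppend]
        simp [← hmemiff v, h]
      have := ih (pre ++ [v]) (d.insert v n) hf' hk'
      have hlen : ((pre ++ [v]).length : Int) = (pre.length : Int) + 1 := by
        simp
      rw [hlen] at this
      rw [this, PySem.Dict.items_insert_of_not_contains d _ hdc]
      have hlen2 : ((PySem.Set.ofList (pre ++ [v])).length : Int) = n + 1 := by
        rw [pvOfListAppend]; simp [← hmemiff v, h, hn]
      rw [hlen2]
      simp [pvFreshP, h, pvIdx]

-- ===== VERDICT (by name: the statement is the Claim_ definition above) =====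
theorem create_vertex_spec : Claim_equal_create_vertex := by
  intro l _
  show create_vertex l = create_vertex_alt l
  unfold create_vertex create_vertex_alt
  rw [pvFoldFlat]
  set flat := l.flatMap (fun pair => [pair.1, pair.2]) with hflat
  have hA := pvInv flat (PySem.Dict.empty : PySem.Dict Int Int)
  have h0 : (PySem.Dict.empty : PySem.Dict Int Int).size = 0 := rfl
  rw [h0] at hA
  push_cast at hA
  have hB := pvBInv flat flat [] (PySem.Dict.empty : PySem.Dict Int Int)
    (by simp) (by rfl)
  simp only [List.length_nil, Int.natCast_zero] at hB
  rw [hA, hB, pvFreshP_eq flat [] (PySem.Dict.empty : PySem.Dict Int Int).keys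
    (by intro x; constructor <;> intro hx <;> simp_all [PySem.Dict.keys, PySem.Dict.empty])]
  rfl
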